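-- pv_equiv track=rewrite | github.com/baesooyeon/CodeCertify | 프로그래머스/2/148653. 마법의 엘리베이터/마법의 엘리베이터.py | solution
-- ===== SOURCE A (Python) =====
-- def solution(storey):
--     storey = str(storey)
--
--     answer = 0
--     flag = False
--     for idx in range(len(storey)-1, -1, -1):
--         x = int(storey[idx])
--         # 만약 +1이 된다면
--         if flag:
--             x +=1
--
--         # 만약 x가 5가 넘는다면?
--         if x>5:
--             temp = 10-x
--             flag = True
--         elif x<5:
--             temp = x
--             flag = False
--         elif x==5:
--             temp = x
--             if idx!=0:
--                 # 4이하라면? > 올림을 하지 않는게 좋다!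
--                 if int(storey[idx-1])<=4:
--                     flag = False
--                 # 5이상이라면? > 올림을 하는게 좋다!
--                 else:
--                     flag = True
--             else:
--                 flag = False
--         answer += temp
--
--     # 이거 넣으니까 정답률 46>77로 올라감
--     if flag:
--         answer+=1
--     return answer
-- ===== SOURCE B (Python) =====
-- def solution(storey):
--     if storey < 10:
--         return min(storey, 11 - storey)
--     d = storey % 10
--     return min(d + solution(storey // 10), (10 - d) + solution(storey // 10 + 1))
-- ===== Notes on version B (the rewrite author's own statement) =====
-- stated objective: alternative
-- what changed: Replaces the greedy least-significant-digit scan with carry flag and lookahead tie-break at 5 by a branching recursion that computes the exact minimum over both choices (round the digit down vs round it up) at every digit; no string conversion, no carry flag, no lookahead, no final fix-up.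
import Mathlib
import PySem

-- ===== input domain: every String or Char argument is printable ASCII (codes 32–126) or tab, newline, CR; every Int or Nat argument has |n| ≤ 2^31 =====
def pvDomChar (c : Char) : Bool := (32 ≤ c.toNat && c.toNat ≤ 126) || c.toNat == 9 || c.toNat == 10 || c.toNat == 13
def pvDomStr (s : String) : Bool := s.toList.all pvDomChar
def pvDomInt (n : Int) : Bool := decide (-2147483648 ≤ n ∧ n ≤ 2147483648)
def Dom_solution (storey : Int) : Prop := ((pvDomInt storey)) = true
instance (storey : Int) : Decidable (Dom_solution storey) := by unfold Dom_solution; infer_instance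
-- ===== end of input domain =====

-- B replaces A's greedy digit-string scan (carry flag + lookahead tie-break) by a branching
-- recursion taking the exact minimum of rounding each digit down vs up (alternative algorithm).


-- ===== PORT A =====
-- loop body of A: state = (answer, flag), index idx into the digit string s.
-- str(storey) is kept as its character list (PySem.Int.toChars n = (PySem.Int.toStr n).toList);
-- int(s[idx]) is PySem.Int.ofChars? of the indexed char (getD 0 is unreachable inside Pre_).
def solStep (s : List Char) (st : Int × Bool) (idx : Int) : Int × Bool :=
  let x0 := (PySem.Int.ofChars? [PySem.List.pyGetD s idx ' ']).getD 0
  let x := if st.2 then x0 + 1 else x0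
  if x > 5 then (st.1 + (10 - x), true)
  else if x < 5 then (st.1 + x, false)
  else -- x == 5
    if idx ≠ 0 then
      if (PySem.Int.ofChars? [PySem.List.pyGetD s (idx - 1) ' ']).getD 0 ≤ 4 then
        (st.1 + x, false)
      else (st.1 + x, true)
    else (st.1 + x, false)

def solution (storey : Int) : Int :=
  let s := PySem.Int.toChars storey
  let r := (PySem.List.pyRange (PySem.List.len s - 1) (-1) (-1)).foldl (solStep s) (0, false)
  if r.2 then r.1 + 1 else r.1

-- ===== PORT B =====
-- Source B's recursion; the fuel (storey.toNat + 1) only makes the recursion structurally total: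
-- for storey ≥ 10 both recursive arguments have a strictly smaller toNat, so it never runs out.
def altGo : Nat → Int → Int
  | 0, _ => 0
  | fuel + 1, storey =>
    if storey < 10 then min storey (11 - storey)
    else
      let d := PySem.Int.mod storey 10
      min (d + altGo fuel (PySem.Int.floordiv storey 10))
          ((10 - d) + altGo fuel (PySem.Int.floordiv storey 10 + 1))

def solution_alt (storey : Int) : Int := altGo (storey.toNat + 1) storey

-- ===== PRECONDITION & SPEC =====
-- Pre_ excludes exactly the negative inputs: there A raises ValueError (int('-') on the sign
-- char) and B's recursion does not terminate in Python's semantics for storey ≥ 10 analogues.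
def Pre_solution (storey : Int) : Prop := 0 ≤ storey
instance (storey : Int) : Decidable (Pre_solution storey) := by unfold Pre_solution; infer_instance
def pvWitness_solution : Int := 2554

def Spec_solution (storey : Int) (out : Int) : Prop := out = solution_alt storey
instance (storey : Int) (out : Int) : Decidable (Spec_solution storey out) := by unfold Spec_solution; infer_instance

-- ===== CLAIM (what is proved, stated in full; the proofs are below) =====
def Claim_equal_solution : Prop := ∀ (storey : Int), Dom_solution storey → Pre_solution storey → Spec_solution storey (solution storey)

-- ===== LEMMAS AND PROOFS =====

-- structure of Nat.toDigits (what PySem.Int.toChars reduces to for storey ≥ 0)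
theorem toDigitsCore_acc10 (f : Nat) : ∀ (n : Nat) (acc : List Char),
    Nat.toDigitsCore 10 f n acc = Nat.toDigitsCore 10 f n [] ++ acc := by
  induction f with
  | zero => intro n acc; simp [Nat.toDigitsCore]
  | succ f ih =>
    intro n acc
    simp only [Nat.toDigitsCore]
    by_cases h : n / 10 = 0
    · simp [h]
    · simp only [h, if_false]
      rw [ih (n / 10) [(n % 10).digitChar], ih (n / 10) ((n % 10).digitChar :: acc)]
      simp

theorem toDigitsCore_fuel : ∀ (n f g : Nat), n < f → n < g →
    Nat.toDigitsCore 10 f n [] = Nat.toDigitsCore 10 g n [] := by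
  intro n
  induction n using Nat.strong_induction_on with
  | _ n ih =>
    intro f g hf hg
    match f, g with
    | f + 1, g + 1 =>
      simp only [Nat.toDigitsCore]
      by_cases h : n / 10 = 0
      · simp [h]
      · simp only [h, if_false]
        rw [toDigitsCore_acc10 f, toDigitsCore_acc10 g,
          ih (n / 10) (by omega) f g (by omega) (by omega)]

theorem toDigits10_lt (m : Nat) (h : m < 10) : Nat.toDigits 10 m = [Nat.digitChar m] :=
  Nat.toDigits_of_lt_base h

theorem toDigits10_ge (m : Nat) (h : 10 ≤ m) :
    Nat.toDigits 10 m = Nat.toDigits 10 (m / 10) ++ [Nat.digitChar (m % 10)] := by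
  show Nat.toDigitsCore 10 (m + 1) m [] = _
  simp only [Nat.toDigitsCore]
  have h1 : ¬ (m / 10 = 0) := by omega
  simp only [h1, if_false]
  rw [toDigitsCore_acc10 m (m / 10)]
  unfold Nat.toDigits
  rw [toDigitsCore_fuel (m / 10) m (m / 10 + 1) (by omega) (by omega)]

theorem toDigits10_ne_nil (m : Nat) : Nat.toDigits 10 m ≠ [] := by
  by_cases h : m < 10
  · rw [toDigits10_lt m h]; simp
  · rw [toDigits10_ge m (by omega)]; simp

-- reading a digit char back as an int
theorem ofChars_digitChar (d : Nat) (h : d < 10) :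
    (PySem.Int.ofChars? [Nat.digitChar d]).getD 0 = (d : Int) := by
  interval_cases d <;> decide

-- A's greedy loop re-expressed on the number itself (proof helper; used only to factor the
-- equivalence proof through the greedy strategy)
def gLoop : Nat → Int → Int → Int
  | 0, _, answer => answer
  | fuel + 1, storey, answer =>
    if storey ≠ 0 then
      let d := PySem.Int.mod storey 10
      if d > 5 ∨ (d = 5 ∧ PySem.Int.mod (PySem.Int.floordiv storey 10) 10 ≥ 5) then
        gLoop fuel (PySem.Int.floordiv storey 10 + 1) (answer + (10 - d))
      else
        gLoop fuel (PySem.Int.floordiv storey 10) (answer + d)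
    else answer

theorem gLoop_zero (f : Nat) (a : Int) : gLoop f 0 a = a := by
  cases f <;> simp [gLoop]

-- the one-digit A-side step, written with the values it actually reads
theorem solStep_eval (s : List Char) (answer : Int) (flag : Bool) (idx : Int) :
    solStep s (answer, flag) idx =
      (let x := (if flag then ((PySem.Int.ofChars? [PySem.List.pyGetD s idx ' ']).getD 0) + 1
                 else (PySem.Int.ofChars? [PySem.List.pyGetD s idx ' ']).getD 0);
       if x > 5 then (answer + (10 - x), true)
       else if x < 5 then (answer + x, false)
       else if idx ≠ 0 then
         if (PySem.Int.ofChars? [PySem.List.pyGetD s (idx - 1) ' ']).getD 0 ≤ 4 then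
           (answer + x, false)
         else (answer + x, true)
       else (answer + x, false)) := rfl

-- appending a later digit does not change the step taken at an earlier index
theorem solStep_append (t : List Char) (c : Char) (st : Int × Bool) (idx : Int)
    (h0 : 0 ≤ idx) (h1 : idx < (t.length : Int)) :
    solStep (t ++ [c]) st idx = solStep t st idx := by
  have e1 : PySem.List.pyGetD (t ++ [c]) idx ' ' = PySem.List.pyGetD t idx ' ' := by
    rw [PySem.List.pyGetD_eq_getElem (t ++ [c]) ' ' h0 (by simp; omega),
      PySem.List.pyGetD_eq_getElem t ' ' h0 h1]
    exact List.getElem_append_left (by omega)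
  by_cases hz : idx = 0
  · subst hz; simp [solStep, e1]
  · have e2 : PySem.List.pyGetD (t ++ [c]) (idx - 1) ' ' = PySem.List.pyGetD t (idx - 1) ' ' := by
      rw [PySem.List.pyGetD_eq_getElem (t ++ [c]) ' ' (by omega) (by simp; omega),
        PySem.List.pyGetD_eq_getElem t ' ' (by omega) (by omega)]
      exact List.getElem_append_left (by omega)
    simp [solStep, e1, e2, hz]

theorem toDigits10_getLast? (m : Nat) :
    (Nat.toDigits 10 m).getLast? = some (Nat.digitChar (m % 10)) := by
  by_cases hm : m < 10
  · rw [toDigits10_lt m hm]; simp [Nat.mod_eq_of_lt hm]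
  · rw [toDigits10_ge m (by omega)]; simp

-- A's whole loop (followed by the trailing carry fix-up) on digit string s
def runA (s : List Char) (answer : Int) (flag : Bool) : Int :=
  let r := (PySem.List.pyRange ((s.length : Int) - 1) (-1) (-1)).foldl (solStep s) (answer, flag)
  r.1 + (if r.2 then 1 else 0)

theorem runA_fold (t : List Char) (p : Int × Bool) :
    ((PySem.List.pyRange ((t.length : Int) - 1) (-1) (-1)).foldl (solStep t) p).1 +
      (if ((PySem.List.pyRange ((t.length : Int) - 1) (-1) (-1)).foldl (solStep t) p).2
        then (1 : Int) else 0) = runA t p.1 p.2 := by cases p; rfl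

-- one unfold of the greedy loop for a positive remaining number
theorem gLoop_step (f : Nat) (n a : Int) (hn : 0 < n) (hf : 1 ≤ f) :
    gLoop f n a =
      if n % 10 > 5 ∨ (n % 10 = 5 ∧ (n / 10) % 10 ≥ 5) then
        gLoop (f - 1) (n / 10 + 1) (a + (10 - n % 10))
      else gLoop (f - 1) (n / 10) (a + n % 10) := by
  match f with
  | f + 1 =>
    simp only [gLoop, hn.ne', if_true, ne_eq, not_false_iff,
      PySem.Int.mod_eq_emod_of_pos (show (0:Int) < 10 by norm_num),
      PySem.Int.floordiv_eq_ediv_of_pos (show (0:Int) < 10 by norm_num),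
      Nat.add_sub_cancel]

-- GREEDY INVARIANT: A's loop over the digit string of m, started with carry `flag`,
-- followed by the trailing `if flag: answer += 1`, equals the greedy loop on m plus the carry.
theorem loop_eq : ∀ (m : Nat) (flag : Bool) (answer : Int) (fuel : Nat),
    m + (if flag then 1 else 0) < fuel →
    runA (Nat.toDigits 10 m) answer flag
      = gLoop fuel ((m : Int) + (if flag then 1 else 0)) answer := by
  intro m
  induction m using Nat.strong_induction_on with
  | _ m ih =>
    intro flag answer fuel hfuel
    by_cases hm : m < 10
    · -- single digit: one loop iteration at idx = 0
      unfold runA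
      rw [toDigits10_lt m hm]
      simp only [List.length_singleton, Nat.cast_one]
      rw [show (1 : Int) - 1 = 0 by norm_num,
        PySem.List.pyRange_neg_one_cons (by norm_num),
        PySem.List.pyRange_neg_one_eq_nil (by norm_num)]
      simp only [List.foldl_cons, List.foldl_nil, solStep_eval]
      simp only [show PySem.List.pyGetD [Nat.digitChar m] (0 : Int) ' ' = Nat.digitChar m from rfl,
        ofChars_digitChar m hm]
      rcases flag with _ | _ <;> simp only [if_true, Bool.false_eq_true, if_false] <;>
        interval_cases m <;>
          (first
            | (rw [show fuel = (fuel - 2) + 2 by omega] ;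
                norm_num [gLoop, gLoop_zero, PySem.Int.mod, PySem.Int.floordiv, Int.fmod, Int.fdiv])
            | (rw [show fuel = (fuel - 1) + 1 by omega] ;
                norm_num [gLoop, gLoop_zero, PySem.Int.mod, PySem.Int.floordiv, Int.fmod, Int.fdiv]))
    · -- m ≥ 10: peel the last digit, use the invariant on m / 10
      have h10 : 10 ≤ m := by omega
      have hk10 : m % 10 < 10 := by omega
      unfold runA
      rw [toDigits10_ge m h10]
      set t := Nat.toDigits 10 (m / 10) with ht
      have htne : t ≠ [] := toDigits10_ne_nil (m / 10)
      have htl : 1 ≤ t.length := List.length_pos_iff.mpr htne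
      simp only [List.length_append, List.length_singleton]
      rw [show ((t.length + 1 : Nat) : Int) - 1 = (t.length : Int) by push_cast; ring]
      rw [PySem.List.pyRange_neg_one_cons (show (-1 : Int) < (t.length : Int) by omega)]
      simp only [List.foldl_cons, solStep_eval]
      have e_last : PySem.List.pyGetD (t ++ [Nat.digitChar (m % 10)]) ((t.length : Int)) ' '
          = Nat.digitChar (m % 10) := by
        rw [PySem.List.pyGetD_natCast]
        simp [List.getD_eq_getElem?_getD]
      have e_prev : PySem.List.pyGetD (t ++ [Nat.digitChar (m % 10)]) ((t.length : Int) - 1) ' '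
          = Nat.digitChar ((m / 10) % 10) := by
        rw [show ((t.length : Int) - 1) = ((t.length - 1 : Nat) : Int) by omega,
          PySem.List.pyGetD_natCast]
        have hq : t[t.length - 1]? = some (Nat.digitChar ((m / 10) % 10)) := by
          rw [← List.getLast?_eq_getElem?, ht]
          exact toDigits10_getLast? (m / 10)
        rw [List.getD_eq_getElem?_getD,
          List.getElem?_append_left (show t.length - 1 < t.length by omega), hq]
        rfl
      simp only [e_last, e_prev, ofChars_digitChar (m % 10) hk10,
        ofChars_digitChar ((m / 10) % 10) (by omega)]
      have hstep : ∀ (acc : Int × Bool) (idx : Int),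
          idx ∈ PySem.List.pyRange ((t.length : Int) - 1) (-1) (-1) →
          solStep (t ++ [Nat.digitChar (m % 10)]) acc idx = solStep t acc idx := by
        intro acc idx hmem
        rw [PySem.List.mem_pyRange_neg_one] at hmem
        exact solStep_append t _ acc idx (by omega) (by omega)
      rw [PySem.List.foldl_congr_mem _ _ (solStep t) _ (fun acc x hx => hstep acc x hx)]
      rw [runA_fold]
      rcases flag with _ | _ <;>
        simp only [if_true, Bool.false_eq_true, if_false, add_zero] at hfuel ⊢
      · -- flag = false
        rw [gLoop_step fuel (m : Int) answer (by omega) (by omega)]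
        split_ifs <;>
          first
            | (exfalso; omega)
            | (rw [ht]
               refine (ih (m / 10) (by omega) _ _ (fuel - 1) (by simp; omega)).trans ?_
               congr 1 <;> (try simp) <;> omega)
      · -- flag = true
        rw [gLoop_step fuel ((m : Int) + 1) answer (by omega) (by omega)]
        split_ifs <;>
          first
            | (exfalso; omega)
            | (rw [ht]
               refine (ih (m / 10) (by omega) _ _ (fuel - 1) (by simp; omega)).trans ?_
               congr 1 <;> (try simp) <;> omega)

-- ===== B-side lemmas: altGo is fuel-irrelevant and satisfies the min recurrence =====

theorem altGo_fuel : ∀ (N : Nat) (n : Int) (f g : Nat), n.toNat ≤ N → 0 ≤ n →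
    n.toNat < f → n.toNat < g → altGo f n = altGo g n := by
  intro N
  induction N using Nat.strong_induction_on with
  | _ N ih =>
    intro n f g hle h0 hf hg
    match f, g with
    | f + 1, g + 1 =>
      simp only [altGo]
      by_cases h : n < 10
      · simp [h]
      · simp only [h, if_false,
          PySem.Int.mod_eq_emod_of_pos (show (0:Int) < 10 by norm_num),
          PySem.Int.floordiv_eq_ediv_of_pos (show (0:Int) < 10 by norm_num)]
        rw [ih (n / 10).toNat (by omega) (n / 10) f g (le_refl _) (by omega) (by omega) (by omega),
          ih (n / 10 + 1).toNat (by omega) (n / 10 + 1) f g (le_refl _) (by omega) (by omega) (by omega)]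

theorem Feq_lt (n : Int) (h : n < 10) : solution_alt n = min n (11 - n) := by
  simp [solution_alt, altGo, h]

theorem Feq_ge (n : Int) (h : 10 ≤ n) :
    solution_alt n = min (n % 10 + solution_alt (n / 10))
      ((10 - n % 10) + solution_alt (n / 10 + 1)) := by
  unfold solution_alt
  have e : altGo (n.toNat + 1) n
      = min (n % 10 + altGo n.toNat (n / 10)) ((10 - n % 10) + altGo n.toNat (n / 10 + 1)) := by
    simp only [altGo,
      PySem.Int.mod_eq_emod_of_pos (show (0:Int) < 10 by norm_num),
      PySem.Int.floordiv_eq_ediv_of_pos (show (0:Int) < 10 by norm_num)]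
    rw [if_neg (by omega)]
  rw [e,
    altGo_fuel (n / 10).toNat (n / 10) n.toNat ((n / 10).toNat + 1) (le_refl _) (by omega) (by omega) (by omega),
    altGo_fuel (n / 10 + 1).toNat (n / 10 + 1) n.toNat ((n / 10 + 1).toNat + 1) (le_refl _) (by omega) (by omega) (by omega)]

-- the optimality facts about solution_alt that justify the greedy tie-break
theorem key : ∀ (N : Nat) (n : Int), n.toNat ≤ N → 0 ≤ n →
    (solution_alt (n + 1) ≤ solution_alt n + 1) ∧
    (solution_alt n ≤ solution_alt (n + 1) + 1) ∧
    (5 ≤ n % 10 → solution_alt (n + 1) ≤ solution_alt n) ∧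
    (n % 10 ≤ 4 → solution_alt n ≤ solution_alt (n + 1)) := by
  intro N
  induction N using Nat.strong_induction_on with
  | _ N ih =>
    intro n hle h0
    by_cases hsm : n ≤ 9
    · interval_cases n <;> exact ⟨by decide, by decide, by decide, by decide⟩
    · have h10 : 10 ≤ n := by omega
      obtain ⟨A1, A2, _, _⟩ := ih (n / 10).toNat (by omega) (n / 10) (le_refl _) (by omega)
      obtain ⟨B1, B2, _, _⟩ := ih (n / 10 + 1).toNat (by omega) (n / 10 + 1) (le_refl _) (by omega)
      rw [Feq_ge n h10, Feq_ge (n + 1) (by omega)]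
      by_cases h9 : n % 10 = 9
      · rw [show (n + 1) / 10 = n / 10 + 1 by omega, show (n + 1) % 10 = 0 by omega]
        rw [show n / 10 + 1 + 1 = n / 10 + 1 + 1 from rfl]
        refine ⟨by omega, by omega, fun _ => by omega, fun hc => by omega⟩
      · rw [show (n + 1) / 10 = n / 10 by omega, show (n + 1) % 10 = n % 10 + 1 by omega]
        refine ⟨by omega, by omega, fun hc => by omega, fun hc => by omega⟩

-- the greedy loop computes exactly the recursive minimum
theorem gLoop_eq_alt : ∀ (N : Nat) (n a : Int) (fuel : Nat), n.toNat ≤ N → 0 ≤ n →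
    n < (fuel : Int) → gLoop fuel n a = a + solution_alt n := by
  intro N
  induction N using Nat.strong_induction_on with
  | _ N ih =>
    intro n a fuel hle h0 hfuel
    by_cases hz : n = 0
    · subst hz
      rw [gLoop_zero, Feq_lt 0 (by norm_num)]
      omega
    · rw [gLoop_step fuel n a (by omega) (by omega)]
      by_cases hsm : n ≤ 9
      · rw [show n % 10 = n by omega, show n / 10 = 0 by omega]
        by_cases h5 : n ≤ 5
        · rw [if_neg (by omega), gLoop_zero, Feq_lt n (by omega)]
          omega
        · rw [if_pos (by omega),
            gLoop_step (fuel - 1) (0 + 1) (a + (10 - n)) (by norm_num) (by omega)]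
          norm_num
          rw [gLoop_zero, Feq_lt n (by omega)]
          omega
      · have h10 : 10 ≤ n := by omega
        obtain ⟨A1, A2, P3, P4⟩ := key (n / 10).toNat (n / 10) (le_refl _) (by omega)
        rw [Feq_ge n h10]
        split_ifs with h
        · rw [ih (n / 10 + 1).toNat (by omega) (n / 10 + 1) _ (fuel - 1) (le_refl _) (by omega) (by omega)]
          rcases h with h | ⟨he, hge⟩
          · omega
          · have := P3 (by omega); omega
        · rw [ih (n / 10).toNat (by omega) (n / 10) _ (fuel - 1) (le_refl _) (by omega) (by omega)]
          rw [not_or, not_and_or] at h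
          by_cases he : n % 10 = 5
          · have := P4 (by omega); omega
          · omega

-- ===== VERDICT (by name: the statement is the Claim_ definition above) =====
theorem solution_spec : Claim_equal_solution := by
  intro storey _ hpre
  have hp : (0 : Int) ≤ storey := hpre
  unfold Spec_solution solution
  have hchars : PySem.Int.toChars storey = Nat.toDigits 10 storey.toNat := by
    unfold PySem.Int.toChars
    rw [if_neg (by omega)]
  simp only [hchars, PySem.List.len_eq]
  have h := loop_eq storey.toNat false 0 (storey.natAbs + 1) (by simp only [Bool.false_eq_true, if_false, add_zero]; omega)
  unfold runA at h
  simp only [Bool.false_eq_true, if_false, add_zero] at h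
  rw [show ((storey.toNat : Int)) = storey by omega] at h
  have h2 := gLoop_eq_alt storey.toNat storey 0 (storey.natAbs + 1) (le_refl _) hp (by omega)
  rw [h2, zero_add] at h
  rw [← h]
  cases hr : ((PySem.List.pyRange ((Nat.toDigits 10 storey.toNat).length - 1 : Int) (-1) (-1)).foldl
      (solStep (Nat.toDigits 10 storey.toNat)) (0, false)).2 <;> simp
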